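-- pv_equiv track=rewrite | github.com/AyaDelRey/I3_Python | exo_long/exo_long.py | create_snake
-- ===== SOURCE A (Python) =====
-- def create_snake(lines, cols):
--     grid = []
--     count = 1
--     for i in range(lines):
--         line = list(range(count, count + cols))
--         count += cols
-- # l'expression if i % 2 == 0 est utilisée pour tester si l'indice de la ligne est pair
--         if i % 2 != 0:
--             line.reverse()
--         grid.append(line)
--     return grid
-- ===== SOURCE B (Python) =====
-- def create_snake(lines, cols):
--     return [[i * cols + j + 1 if i % 2 == 0 else i * cols + cols - j
--              for j in range(cols)]
--             for i in range(lines)]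
-- ===== Notes on version B (the rewrite author's own statement) =====
-- stated objective: simpler
-- what changed: Each cell is computed directly by a per-cell arithmetic formula (i*cols+j+1 on even rows, i*cols+cols-j on odd rows) in one nested comprehension, eliminating the running counter, the intermediate ascending row and the in-place reverse.
import Mathlib
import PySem

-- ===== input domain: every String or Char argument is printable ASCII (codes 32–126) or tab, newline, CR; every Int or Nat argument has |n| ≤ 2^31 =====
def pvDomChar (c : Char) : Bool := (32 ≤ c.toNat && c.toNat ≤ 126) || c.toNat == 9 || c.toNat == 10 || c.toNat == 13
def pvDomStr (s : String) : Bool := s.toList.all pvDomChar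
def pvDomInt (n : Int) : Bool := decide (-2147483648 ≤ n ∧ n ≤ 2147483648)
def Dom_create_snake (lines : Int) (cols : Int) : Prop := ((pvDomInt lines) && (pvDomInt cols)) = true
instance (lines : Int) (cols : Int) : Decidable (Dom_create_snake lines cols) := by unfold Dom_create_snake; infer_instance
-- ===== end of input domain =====

-- B replaces A's counter/range/reverse row construction with a closed-form per-cell formula (simpler).


-- ===== PORT A =====
-- for i in range(lines): line = list(range(count, count+cols)); count += cols;
-- if i % 2 != 0: line.reverse(); grid.append(line)
def create_snake (lines : Int) (cols : Int) : List (List Int) :=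
  ((PySem.List.pyRange 0 lines 1).foldl
    (fun (st : List (List Int) × Int) i =>
      let line := PySem.List.pyRange st.2 (st.2 + cols) 1
      let count := st.2 + cols
      let line := if PySem.Int.mod i 2 ≠ 0 then line.reverse else line
      (st.1 ++ [line], count))
    ([], 1)).1

-- ===== PORT B =====
-- nested comprehension, closed-form cell value
def create_snake_alt (lines : Int) (cols : Int) : List (List Int) :=
  (PySem.List.pyRange 0 lines 1).map (fun i =>
    (PySem.List.pyRange 0 cols 1).map (fun j =>
      if PySem.Int.mod i 2 = 0 then i * cols + j + 1 else i * cols + cols - j))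

-- ===== PRECONDITION & SPEC =====
def Spec_create_snake (lines : Int) (cols : Int) (out : List (List Int)) : Prop := out = create_snake_alt lines cols
instance (lines : Int) (cols : Int) (out : List (List Int)) : Decidable (Spec_create_snake lines cols out) := by unfold Spec_create_snake; infer_instance

-- ===== CLAIM (what is proved, stated in full; the proofs are below) =====
def Claim_equal_create_snake : Prop := ∀ (lines : Int) (cols : Int), Dom_create_snake lines cols → Spec_create_snake lines cols (create_snake lines cols)

-- ===== LEMMAS AND PROOFS =====

-- one row of A (ascending range, reversed on odd i, with count = 1 + i*cols) equals B's formula row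
lemma snake_row (cols : Int) (i : Int) :
    (if PySem.Int.mod i 2 ≠ 0
       then (PySem.List.pyRange (1 + i * cols) (1 + i * cols + cols) 1).reverse
       else PySem.List.pyRange (1 + i * cols) (1 + i * cols + cols) 1)
    = (PySem.List.pyRange 0 cols 1).map (fun j =>
        if PySem.Int.mod i 2 = 0 then i * cols + j + 1 else i * cols + cols - j) := by
  by_cases h : PySem.Int.mod i 2 = 0
  · rw [if_neg (fun hc => hc h)]
    rw [PySem.List.pyRange_one, PySem.List.pyRange_one, List.map_map]
    have harg : 1 + i * cols + cols - (1 + i * cols) = cols - 0 := by ring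
    rw [harg]
    apply List.map_congr_left
    intro k _
    simp only [Function.comp_apply, h, if_pos]
    ring
  · rw [if_pos h]
    have hrev : (PySem.List.pyRange (1 + i * cols) (1 + i * cols + cols) 1).reverse
        = PySem.List.pyRange (1 + i * cols + cols - 1) (1 + i * cols - 1) (-1) := by
      rw [PySem.List.pyRange_neg_one_eq_reverse]
      ring_nf
    rw [hrev, PySem.List.pyRange_neg_one, PySem.List.pyRange_one, List.map_map]
    have harg : 1 + i * cols + cols - 1 - (1 + i * cols - 1) = cols - 0 := by ring
    rw [harg]
    apply List.map_congr_left
    intro k _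
    simp only [Function.comp_apply, h, if_false]
    ring

-- invariant of A's fold: after n rows, grid = B's first n rows and count = 1 + n*cols
lemma snake_fold (cols : Int) (n : Nat) :
    ((PySem.List.pyRange 0 n 1).foldl
      (fun (st : List (List Int) × Int) i =>
        let line := PySem.List.pyRange st.2 (st.2 + cols) 1
        let count := st.2 + cols
        let line := if PySem.Int.mod i 2 ≠ 0 then line.reverse else line
        (st.1 ++ [line], count))
      ([], 1))
    = ((PySem.List.pyRange 0 n 1).map (fun i =>
        (PySem.List.pyRange 0 cols 1).map (fun j =>
          if PySem.Int.mod i 2 = 0 then i * cols + j + 1 else i * cols + cols - j)),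
       1 + n * cols) := by
  induction n with
  | zero => simp [PySem.List.pyRange_one_eq_nil]
  | succ m ih =>
    have hsplit : PySem.List.pyRange 0 ((m : Int) + 1) 1
        = PySem.List.pyRange 0 (m : Int) 1 ++ [(m : Int)] :=
      PySem.List.pyRange_one_succ_right (by exact_mod_cast Nat.zero_le m)
    push_cast
    rw [hsplit, List.foldl_append, ih, List.map_append]
    simp only [List.foldl_cons, List.foldl_nil, List.map_cons, List.map_nil]
    refine Prod.ext ?_ (by push_cast; ring)
    simp only
    rw [snake_row cols (m : Int)]

-- ===== VERDICT (by name: the statement is the Claim_ definition above) =====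
theorem create_snake_spec : Claim_equal_create_snake := by
  intro lines cols _
  unfold Spec_create_snake create_snake create_snake_alt
  by_cases h : 0 < lines
  · have : lines = ((lines.toNat : Int)) := by omega
    rw [this, snake_fold cols lines.toNat]
  · rw [PySem.List.pyRange_one_eq_nil (by omega)]
    simp
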